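-- pv_equiv track=rewrite | github.com/ant2022tna/train_free | training_free_grpo/medical/verify.py | classify_answer
-- ===== SOURCE A (Python) =====
-- def classify_answer(input_text: str, final_answer: str) -> str:
--     """
--     Classifies the final answer to a multiple choice option.
--
--     Args:
--         input_text (str): The original question text including options.
--         final_answer (str): The model's answer.
--
--     Returns:
--         str: The classified option letter (e.g., "A", "B") or an empty string if it cannot be determined.
--     """
--     if not final_answer:
--         return ""
--
--     def clean_text(text: str) -> str:
--         if not text:
--             return ""
--         return text.lower().strip().replace('`', '').replace('(', '').replace(')', '')
--
--     def extract_option_text(input_text: str, option_letter: str) -> str: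
--         try:
--             # Try different formats of options sections
--             options_section = ""
--             if 'options:' in input_text.lower():
--                 options_section = input_text.lower().split('options:')[1].strip()
--             elif 'choices:' in input_text.lower():
--                 options_section = input_text.lower().split('choices:')[1].strip()
--
--             if not options_section:
--                 # Try to find options in the format (A) text, (B) text
--                 lines = input_text.lower().split('\n')
--                 for i, line in enumerate(lines):
--                     if line.strip().startswith(f'({option_letter})') or line.strip().startswith(f'{option_letter})'):
--                         return line.split(')', 1)[1].strip()
--
--             # Process the options section if found
--             for line in options_section.split('\n'):
--                 line = line.strip()
--                 if line.startswith(f'({option_letter})') or line.startswith(f'{option_letter})'):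
--                     return line.split(')', 1)[1].strip()
--                 # Handle options like "A. text" format
--                 if line.startswith(f'{option_letter}.'):
--                     return line.split('.', 1)[1].strip()
--         except:
--             return ''
--         return ''
--
--     clean_answer = clean_text(final_answer)
--     possible_options = ['A', 'B', 'C', 'D', 'E', 'F', 'G', 'H', 'I', 'J', 'K', 'L', 'M', 'N', 'O', 'P', 'Q', 'R', 'S', 'T', 'U', 'V', 'W', 'X', 'Y', 'Z']
--
--     # 1. Check for single-letter answers or formats like "A."
--     if len(clean_answer) == 1 and clean_answer.upper() in possible_options:
--         return clean_answer.upper()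
--     if len(clean_answer) == 2 and clean_answer.endswith('.') and clean_answer[0].upper() in possible_options:
--         return clean_answer[0].upper()
--
--     # 2. Check for formats like "Option A" or "The answer is A"
--     words = clean_answer.split()
--     if len(words) > 0:
--         last_word = words[-1].strip('.').upper()
--         if last_word in possible_options:
--             return last_word
--
--     # 3. Match against the full text of the option
--     for option in possible_options:
--         option_text = extract_option_text(input_text, option.lower())
--         if option_text and clean_text(option_text) in clean_answer:
--             return option
--
--     return ""
-- ===== SOURCE B (Python) =====
-- def classify_answer(input_text: str, final_answer: str) -> str:
--     """Classify the final answer to a multiple-choice option letter.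
--
--     Same result as the original, but the option table (letter -> option text)
--     is built in ONE pass over the relevant lines instead of re-parsing the
--     whole input once per letter.
--     """
--     if not final_answer:
--         return ""
--
--     def clean_text(text: str) -> str:
--         if not text:
--             return ""
--         return text.lower().strip().replace('`', '').replace('(', '').replace(')', '')
--
--     clean_answer = clean_text(final_answer)
--     possible_options = ['A', 'B', 'C', 'D', 'E', 'F', 'G', 'H', 'I', 'J', 'K', 'L', 'M',
--                         'N', 'O', 'P', 'Q', 'R', 'S', 'T', 'U', 'V', 'W', 'X', 'Y', 'Z']
--
--     # 1. Check for single-letter answers or formats like "A."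
--     if len(clean_answer) == 1 and clean_answer.upper() in possible_options:
--         return clean_answer.upper()
--     if len(clean_answer) == 2 and clean_answer.endswith('.') and clean_answer[0].upper() in possible_options:
--         return clean_answer[0].upper()
--
--     # 2. Check for formats like "Option A" or "The answer is A"
--     words = clean_answer.split()
--     if len(words) > 0:
--         last_word = words[-1].strip('.').upper()
--         if last_word in possible_options:
--             return last_word
--
--     # 3. Build the letter -> option-text table in a single pass, then look up.
--     lower = input_text.lower()
--     section = ""
--     for tag in ('options:', 'choices:'):
--         if tag in lower:
--             section = lower.split(tag)[1].strip()
--             break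
--
--     table = {}
--     if section:
--         # markers "(x)", "x)" and "x."
--         for raw in section.split('\n'):
--             line = raw.strip()
--             if len(line) >= 3 and line[0] == '(' and 'a' <= line[1] <= 'z' and line[2] == ')':
--                 table.setdefault(line[1], line.split(')', 1)[1].strip())
--             elif len(line) >= 2 and 'a' <= line[0] <= 'z' and line[1] == ')':
--                 table.setdefault(line[0], line.split(')', 1)[1].strip())
--             elif len(line) >= 2 and 'a' <= line[0] <= 'z' and line[1] == '.':
--                 table.setdefault(line[0], line.split('.', 1)[1].strip())
--     else:
--         # no options section: markers "(x)" and "x)" only, over all lines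
--         for raw in lower.split('\n'):
--             line = raw.strip()
--             if len(line) >= 3 and line[0] == '(' and 'a' <= line[1] <= 'z' and line[2] == ')':
--                 table.setdefault(line[1], raw.split(')', 1)[1].strip())
--             elif len(line) >= 2 and 'a' <= line[0] <= 'z' and line[1] == ')':
--                 table.setdefault(line[0], raw.split(')', 1)[1].strip())
--
--     for option in possible_options:
--         text = table.get(option.lower())
--         if text and clean_text(text) in clean_answer:
--             return option
--
--     return ""
-- ===== Notes on version B (the rewrite author's own statement) =====
-- stated objective: faster
-- what changed: Step 3's 26 calls to extract_option_text (each re-lowering, re-splitting and re-scanning the whole input per letter) are replaced by ONE pass over the relevant lines that builds a first-match-wins dict letter->option text via setdefault, followed by an ordered A..Z lookup in that dict; steps 1-2 are unchanged.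
import Mathlib
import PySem

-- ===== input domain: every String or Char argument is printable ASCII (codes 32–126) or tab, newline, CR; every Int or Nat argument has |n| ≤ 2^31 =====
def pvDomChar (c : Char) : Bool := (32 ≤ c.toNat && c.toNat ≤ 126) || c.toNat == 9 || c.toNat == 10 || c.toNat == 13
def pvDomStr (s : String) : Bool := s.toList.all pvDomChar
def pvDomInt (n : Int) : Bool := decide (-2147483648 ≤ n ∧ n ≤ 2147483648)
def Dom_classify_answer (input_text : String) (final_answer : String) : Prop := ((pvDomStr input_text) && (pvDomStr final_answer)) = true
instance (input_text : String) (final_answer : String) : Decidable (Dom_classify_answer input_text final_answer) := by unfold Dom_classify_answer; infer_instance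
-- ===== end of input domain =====

-- B replaces A's 26 whole-input re-parses (one extract_option_text call per letter) by ONE
-- pass over the relevant lines that builds a first-match-wins dict letter -> option text,
-- followed by an ordered A..Z table lookup.  Return values only; no argument is mutated.

-- ===== PORT A =====

-- shared by both Pythons verbatim: clean_text and the possible_options list
def cleanText (t : String) : String :=
  if t = "" then ""
  else PySem.Str.replace (PySem.Str.replace (PySem.Str.replace
         (PySem.Str.strip (PySem.Str.lower t)) "`" "") "(" "") ")" ""

def possibleOptions : List String :=
  ["A","B","C","D","E","F","G","H","I","J","K","L","M",
   "N","O","P","Q","R","S","T","U","V","W","X","Y","Z"]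

-- s.split(sep, 1)[1] (both Pythons only evaluate it when sep is known to occur in s,
-- so the [1] index is guarded; the getD defaults are never reached)
def splitAfter (s : String) (sep : String) : String :=
  ((PySem.Str.splitMax? s sep 1).getD []).getD 1 ""

-- input_text.lower().split(tag)[1]  (guarded by 'tag in low')
def segAfter (low : String) (tag : String) : String :=
  ((PySem.Str.split? low tag).getD []).getD 1 ""

-- the fallback loop of extract_option_text: lines of the whole lowered input,
-- markers '(x)' and 'x)' only, the returned text split from the UNSTRIPPED line
def fallbackScan : List String → Char → Option String
  | [], _ => none
  | l :: ls, c =>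
    if PySem.Str.startswith (PySem.Str.strip l) (String.ofList ['(', c, ')'])
        || PySem.Str.startswith (PySem.Str.strip l) (String.ofList [c, ')']) then
      some (PySem.Str.strip (splitAfter l ")"))
    else fallbackScan ls c

-- the options-section loop: markers '(x)', 'x)' and 'x.', on the stripped line
def sectionScan : List String → Char → Option String
  | [], _ => none
  | l0 :: ls, c =>
    let l := PySem.Str.strip l0
    if PySem.Str.startswith l (String.ofList ['(', c, ')'])
        || PySem.Str.startswith l (String.ofList [c, ')']) then
      some (PySem.Str.strip (splitAfter l ")"))
    else if PySem.Str.startswith l (String.ofList [c, '.']) then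
      some (PySem.Str.strip (splitAfter l "."))
    else sectionScan ls c

-- extract_option_text (the try/except never fires: every indexing is guarded)
def extractOptionText (input_text : String) (c : Char) : String :=
  let low := PySem.Str.lower input_text
  let optionsSection :=
    if PySem.Str.isIn "options:" low then PySem.Str.strip (segAfter low "options:")
    else if PySem.Str.isIn "choices:" low then PySem.Str.strip (segAfter low "choices:")
    else ""
  if optionsSection = "" then
    match fallbackScan ((PySem.Str.split? low "\n").getD []) c with
    | some r => r
    | none => (sectionScan ((PySem.Str.split? optionsSection "\n").getD []) c).getD ""
  else (sectionScan ((PySem.Str.split? optionsSection "\n").getD []) c).getD ""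

-- step 3 of A: one extract_option_text call per option letter
def step3A (input_text : String) (ca : String) : List String → String
  | [] => ""
  | o :: os =>
    let t := extractOptionText input_text ((PySem.Str.lower o).toList.headD ' ')
    if t ≠ "" && PySem.Str.isIn (cleanText t) ca then o else step3A input_text ca os

def classifyA3 (input_text : String) (ca : String) : String :=
  let words := PySem.Str.split₀ ca
  match PySem.List.pyGet? words (-1) with
  | some w =>
    let lw := PySem.Str.upper (PySem.Str.stripChars w ".")
    if possibleOptions.contains lw then lw else step3A input_text ca possibleOptions
  | none => step3A input_text ca possibleOptions

def classifyA2 (input_text : String) (ca : String) : String :=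
  match PySem.Str.pyGet? ca 0 with
  | some c0 =>
    if PySem.Str.len ca = 2 && PySem.Str.endswith ca "."
        && possibleOptions.contains (String.ofList [PySem.Chars.upperChar c0]) then
      String.ofList [PySem.Chars.upperChar c0]
    else classifyA3 input_text ca
  | none => classifyA3 input_text ca

def classify_answer (input_text : String) (final_answer : String) : String :=
  if final_answer = "" then ""
  else
    let ca := cleanText final_answer
    if PySem.Str.len ca = 1 && possibleOptions.contains (PySem.Str.upper ca) then
      PySem.Str.upper ca
    else classifyA2 input_text ca

-- ===== PORT B =====

-- one line of the options section: which letter it defines and its option text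
-- (the len/index tests of Source B, on the stripped line's characters)
def entrySection (raw : String) : Option (Char × String) :=
  let line := PySem.Str.strip raw
  match line.toList with
  | x :: y :: rest =>
    if x = '(' ∧ ('a' ≤ y ∧ y ≤ 'z') ∧ rest.head? = some ')' then
      some (y, PySem.Str.strip (splitAfter line ")"))
    else if ('a' ≤ x ∧ x ≤ 'z') ∧ y = ')' then
      some (x, PySem.Str.strip (splitAfter line ")"))
    else if ('a' ≤ x ∧ x ≤ 'z') ∧ y = '.' then
      some (x, PySem.Str.strip (splitAfter line "."))
    else none
  | _ => none

-- one line of the whole input (no options section): '(x)'/'x)' markers only,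
-- the text split from the unstripped line
def entryFallback (raw : String) : Option (Char × String) :=
  let line := PySem.Str.strip raw
  match line.toList with
  | x :: y :: rest =>
    if x = '(' ∧ ('a' ≤ y ∧ y ≤ 'z') ∧ rest.head? = some ')' then
      some (y, PySem.Str.strip (splitAfter raw ")"))
    else if ('a' ≤ x ∧ x ≤ 'z') ∧ y = ')' then
      some (x, PySem.Str.strip (splitAfter raw ")"))
    else none
  | _ => none

-- dict.setdefault over all lines: first line wins for each letter
def buildTable (entry : String → Option (Char × String)) (lines : List String) :
    PySem.Dict Char String :=
  lines.foldl (fun d raw =>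
    match entry raw with
    | some cv => d.setdefault cv.1 cv.2
    | none => d) PySem.Dict.empty

-- ordered A..Z lookup in the prebuilt table
def lookupLoop (table : PySem.Dict Char String) (ca : String) : List String → String
  | [] => ""
  | o :: os =>
    match table.get? ((PySem.Str.lower o).toList.headD ' ') with
    | some t => if t ≠ "" && PySem.Str.isIn (cleanText t) ca then o else lookupLoop table ca os
    | none => lookupLoop table ca os

def step3B (input_text : String) (ca : String) : String :=
  let low := PySem.Str.lower input_text
  let sect :=
    if PySem.Str.isIn "options:" low then PySem.Str.strip (segAfter low "options:")
    else if PySem.Str.isIn "choices:" low then PySem.Str.strip (segAfter low "choices:")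
    else ""
  let table :=
    if sect ≠ "" then buildTable entrySection ((PySem.Str.split? sect "\n").getD [])
    else buildTable entryFallback ((PySem.Str.split? low "\n").getD [])
  lookupLoop table ca possibleOptions

def classifyB3 (input_text : String) (ca : String) : String :=
  let words := PySem.Str.split₀ ca
  match PySem.List.pyGet? words (-1) with
  | some w =>
    let lw := PySem.Str.upper (PySem.Str.stripChars w ".")
    if possibleOptions.contains lw then lw else step3B input_text ca
  | none => step3B input_text ca

def classifyB2 (input_text : String) (ca : String) : String :=
  match PySem.Str.pyGet? ca 0 with
  | some c0 =>
    if PySem.Str.len ca = 2 && PySem.Str.endswith ca "."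
        && possibleOptions.contains (String.ofList [PySem.Chars.upperChar c0]) then
      String.ofList [PySem.Chars.upperChar c0]
    else classifyB3 input_text ca
  | none => classifyB3 input_text ca

def classify_answer_alt (input_text : String) (final_answer : String) : String :=
  if final_answer = "" then ""
  else
    let ca := cleanText final_answer
    if PySem.Str.len ca = 1 && possibleOptions.contains (PySem.Str.upper ca) then
      PySem.Str.upper ca
    else classifyB2 input_text ca

-- ===== PRECONDITION & SPEC =====
def Spec_classify_answer (input_text : String) (final_answer : String) (out : String) : Prop := out = classify_answer_alt input_text final_answer
instance (input_text : String) (final_answer : String) (out : String) : Decidable (Spec_classify_answer input_text final_answer out) := by unfold Spec_classify_answer; infer_instance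

-- ===== CLAIM (what is proved, stated in full; the proofs are below) =====
def Claim_equal_classify_answer : Prop := ∀ (input_text : String) (final_answer : String), Dom_classify_answer input_text final_answer → Spec_classify_answer input_text final_answer (classify_answer input_text final_answer)

-- ===== LEMMAS AND PROOFS =====

-- what one line contributes to letter c
def pickC (c : Char) (e : Option (Char × String)) : Option String :=
  match e with
  | some cv => if cv.1 = c then some cv.2 else none
  | none => none

-- first contribution for letter c over a list of lines
def genScan (entry : String → Option (Char × String)) : List String → Char → Option String
  | [], _ => none
  | l :: ls, c =>
    match pickC c (entry l) with
    | some v => some v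
    | none => genScan entry ls c

lemma get?_foldl_setdefault (entry : String → Option (Char × String))
    (lines : List String) (d : PySem.Dict Char String) (c : Char) :
    (lines.foldl (fun d raw =>
      match entry raw with
      | some cv => d.setdefault cv.1 cv.2
      | none => d) d).get? c = ((d.get? c).or (genScan entry lines c)) := by
  induction lines generalizing d with
  | nil => simp [genScan]
  | cons l ls ih =>
    simp only [List.foldl_cons]
    rcases he : entry l with _ | ⟨x, v⟩
    · simp [ih, genScan, pickC, he]
    · simp only [ih, genScan, pickC, he]
      by_cases hx : x = c
      · subst hx
        rw [PySem.Dict.get?_setdefault_self]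
        rcases d.get? x <;> simp
      · rw [PySem.Dict.get?_setdefault_of_ne _ v (fun h => hx h.symm)]
        simp [hx]

lemma get?_buildTable (entry : String → Option (Char × String))
    (lines : List String) (c : Char) :
    (buildTable entry lines).get? c = genScan entry lines c := by
  unfold buildTable
  rw [get?_foldl_setdefault]
  simp [PySem.Dict.empty, PySem.Dict.get?]


-- startswith on explicitly destructured lists (marker patterns have length 2 or 3)
lemma sw_cc2 (x y : Char) (t : List Char) (a b : Char) :
    PySem.Chars.startswith (x::y::t) [a,b] = (x = a && y = b) := by
  rw [Bool.eq_iff_iff, PySem.Chars.startswith_iff]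
  simp [List.cons_prefix_cons]
  constructor
  · rintro ⟨h1, h2⟩; exact ⟨h1.symm, h2.symm⟩
  · rintro ⟨h1, h2⟩; exact ⟨h1.symm, h2.symm⟩

lemma sw_cc3 (x y : Char) (t : List Char) (a b c : Char) :
    PySem.Chars.startswith (x::y::t) [a,b,c] = (x = a && y = b && t.head? = some c) := by
  rw [Bool.eq_iff_iff, PySem.Chars.startswith_iff]
  simp [List.cons_prefix_cons, and_assoc]
  constructor
  · rintro ⟨h1, h2, h3⟩
    refine ⟨h1.symm, h2.symm, ?_⟩
    cases t with
    | nil => simp at h3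
    | cons z t => simp at h3; simp [h3.symm]
  · rintro ⟨h1, h2, h3⟩
    refine ⟨h1.symm, h2.symm, ?_⟩
    cases t with
    | nil => simp at h3
    | cons z t => simp at h3; simp [List.cons_prefix_cons, h3.symm]

lemma sw_short (x : Char) (p : List Char) (hp : 2 ≤ p.length) : PySem.Chars.startswith [x] p = false := by
  rw [← Bool.not_eq_true, PySem.Chars.startswith_iff]
  intro h; have := h.length_le; simp at this; omega

lemma sw_nil (p : List Char) (hp : p ≠ []) : PySem.Chars.startswith [] p = false := by
  rw [← Bool.not_eq_true, PySem.Chars.startswith_iff]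
  intro h; have := h.length_le; simp at this; simp [this] at hp

-- per-line: B's pattern match picks letter c exactly when A's startswith tests fire (section form)
lemma pickC_entrySection (c : Char) (hc : 'a' ≤ c ∧ c ≤ 'z') (raw : String) :
    pickC c (entrySection raw) =
      (if PySem.Str.startswith (PySem.Str.strip raw) (String.ofList ['(', c, ')'])
          || PySem.Str.startswith (PySem.Str.strip raw) (String.ofList [c, ')']) then
        some (PySem.Str.strip (splitAfter (PySem.Str.strip raw) ")"))
      else if PySem.Str.startswith (PySem.Str.strip raw) (String.ofList [c, '.']) then
        some (PySem.Str.strip (splitAfter (PySem.Str.strip raw) "."))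
      else none) := by
  unfold pickC entrySection
  simp only [PySem.Str.startswith_eq, String.toList_ofList]
  generalize (PySem.Str.strip raw) = s
  rcases s.toList with _ | ⟨x, _ | ⟨y, t⟩⟩
  · simp [sw_nil]
  · simp [sw_short]
  · rw [sw_cc3, sw_cc2, sw_cc2]
    simp only [Bool.or_eq_true, Bool.and_eq_true, decide_eq_true_eq]
    have hA : ¬ ('a' ≤ '(') := by decide
    have hB : ¬ ('a' ≤ ')') := by decide
    have hC : ¬ ('a' ≤ '.') := by decide
    obtain ⟨hc1, hc2⟩ := hc
    split_ifs <;> simp_all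
    · rename_i hor; rcases hor with h | ⟨h1, _⟩
      · exact h
      · subst h1; exact absurd hc1 (by decide)
    · rename_i hor; rcases hor with ⟨⟨_, h2⟩, _⟩ | h
      · subst h2; exact absurd hc1 (by decide)
      · exact h
    · rename_i h3 h2 h1 hor
      rcases hor with ⟨⟨hx, hy⟩, hh⟩ | ⟨hx, hy⟩
      · subst hy; exact h3 hx hc1 hc2 hh
      · subst hx; exact h2 hc1 hc2 hy

lemma pickC_entryFallback (c : Char) (hc : 'a' ≤ c ∧ c ≤ 'z') (raw : String) :
    pickC c (entryFallback raw) =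
      (if PySem.Str.startswith (PySem.Str.strip raw) (String.ofList ['(', c, ')'])
          || PySem.Str.startswith (PySem.Str.strip raw) (String.ofList [c, ')']) then
        some (PySem.Str.strip (splitAfter raw ")"))
      else none) := by
  unfold pickC entryFallback
  simp only [PySem.Str.startswith_eq, String.toList_ofList]
  generalize (PySem.Str.strip raw) = s
  rcases s.toList with _ | ⟨x, _ | ⟨y, t⟩⟩
  · simp [sw_nil]
  · simp [sw_short]
  · rw [sw_cc3, sw_cc2]
    simp only [Bool.or_eq_true, Bool.and_eq_true, decide_eq_true_eq]
    obtain ⟨hc1, hc2⟩ := hc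
    split_ifs <;> simp_all
    · rename_i hor; rcases hor with h | ⟨h1, _⟩
      · exact h
      · subst h1; exact absurd hc1 (by decide)
    · rename_i hor; rcases hor with ⟨⟨_, h2⟩, _⟩ | h
      · subst h2; exact absurd hc1 (by decide)
      · exact h
    · rename_i h2 h1 hor
      rcases hor with ⟨⟨hx, hy⟩, hh⟩ | ⟨hx, hy⟩
      · subst hy; exact h2 hx hc1 hc2 hh
      · subst hx; exact h1 hc1 hc2 hy

lemma genScan_section (lines : List String) (c : Char) (hc : 'a' ≤ c ∧ c ≤ 'z') :
    genScan entrySection lines c = sectionScan lines c := by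
  induction lines with
  | nil => rfl
  | cons l ls ih =>
    simp only [genScan, sectionScan, ih, pickC_entrySection c hc l]
    split_ifs <;> rfl

lemma genScan_fallback (lines : List String) (c : Char) (hc : 'a' ≤ c ∧ c ≤ 'z') :
    genScan entryFallback lines c = fallbackScan lines c := by
  induction lines with
  | nil => rfl
  | cons l ls ih =>
    simp only [genScan, fallbackScan, ih, pickC_entryFallback c hc l]
    split_ifs <;> rfl

-- the degenerate section loop over ''.split('\n') finds nothing
lemma sectionScan_empty (c : Char) :
    sectionScan ((PySem.Str.split? "" "\n").getD []) c = none := by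
  show sectionScan [""] c = none
  simp [sectionScan, PySem.Str.startswith_eq, PySem.Str.toList_strip, PySem.Chars.strip,
        PySem.Chars.lstrip, PySem.Chars.rstrip, sw_nil]

-- the table B builds, as one definition (defeq to the let-chain inside step3B)
def tableOf (input_text : String) : PySem.Dict Char String :=
  let low := PySem.Str.lower input_text
  let sect :=
    if PySem.Str.isIn "options:" low then PySem.Str.strip (segAfter low "options:")
    else if PySem.Str.isIn "choices:" low then PySem.Str.strip (segAfter low "choices:")
    else ""
  if sect ≠ "" then buildTable entrySection ((PySem.Str.split? sect "\n").getD [])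
  else buildTable entryFallback ((PySem.Str.split? low "\n").getD [])

-- A's extract_option_text for a letter = lookup in B's prebuilt table
lemma extract_eq_table (input_text : String) (c : Char) (hc : 'a' ≤ c ∧ c ≤ 'z') :
    extractOptionText input_text c = ((tableOf input_text).get? c).getD "" := by
  simp only [extractOptionText, tableOf]
  generalize (if PySem.Str.isIn "options:" (PySem.Str.lower input_text) = true then
      PySem.Str.strip (segAfter (PySem.Str.lower input_text) "options:")
    else if PySem.Str.isIn "choices:" (PySem.Str.lower input_text) = true then
      PySem.Str.strip (segAfter (PySem.Str.lower input_text) "choices:")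
    else "") = S
  by_cases h : S = ""
  · subst h
    simp only [ne_eq, not_true_eq_false, ite_false]
    rw [get?_buildTable, genScan_fallback _ _ hc]
    rcases hf : fallbackScan ((PySem.Str.split? (PySem.Str.lower input_text) "\n").getD []) c with _ | r
    · simp [sectionScan_empty]
    · simp
  · simp only [ne_eq, h, not_false_eq_true, if_pos]
    rw [get?_buildTable, genScan_section _ _ hc]
    simp

-- step 3: A's per-letter extract loop = B's ordered lookup in the prebuilt table
lemma step3_gen (input_text ca : String) (opts : List String)
    (h : ∀ o ∈ opts, 'a' ≤ (PySem.Str.lower o).toList.headD ' '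
        ∧ (PySem.Str.lower o).toList.headD ' ' ≤ 'z') :
    step3A input_text ca opts = lookupLoop (tableOf input_text) ca opts := by
  induction opts with
  | nil => rfl
  | cons o os ih =>
    have hc := h o (List.mem_cons_self ..)
    have hrec := ih (fun o' ho' => h o' (List.mem_cons_of_mem _ ho'))
    simp only [step3A, lookupLoop]
    rw [extract_eq_table input_text _ hc]
    rcases (tableOf input_text).get? ((PySem.Str.lower o).toList.headD ' ') with _ | v
    · simp [hrec]
    · simp [hrec]

lemma step3AB (input_text ca : String) :
    step3A input_text ca possibleOptions = step3B input_text ca := by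
  have h : ∀ o ∈ possibleOptions, 'a' ≤ (PySem.Str.lower o).toList.headD ' '
      ∧ (PySem.Str.lower o).toList.headD ' ' ≤ 'z' := by decide
  rw [step3_gen input_text ca possibleOptions h]
  rfl

lemma classifyA3_eq (input_text ca : String) : classifyA3 input_text ca = classifyB3 input_text ca := by
  unfold classifyA3 classifyB3
  rw [step3AB]

lemma classifyA2_eq (input_text ca : String) : classifyA2 input_text ca = classifyB2 input_text ca := by
  unfold classifyA2 classifyB2
  simp only [classifyA3_eq]

theorem classify_answer_spec : Claim_equal_classify_answer := by
  unfold Claim_equal_classify_answer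
  intro input_text final_answer _
  unfold Spec_classify_answer classify_answer classify_answer_alt
  simp only [classifyA2_eq]
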